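-- pv_equiv track=rewrite | github.com/daxiongshu/network | sparse/rebuild5.py | sortline
-- ===== SOURCE A (Python) =====
-- def sortline(line,maxf,test=False):
--     tmp=[]
--     for i in sorted(line.keys()):
--         if maxf<i and test==False:
--             maxf=i
--         if test and i>maxf:
--             continue
--
--         tmp.append('%d:%d'%(i,line[i]))
--     return tmp,maxf
-- ===== SOURCE B (Python) =====
-- def sortline(line, maxf, test=False):
--     # Single pass over the dict: keep `pairs` sorted by key via insertion
--     # (no call to sorted()), filter at insertion time in test mode, and
--     # track the largest key separately; format in one final pass.
--     pairs = []
--     top = None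
--     for i, v in line.items():
--         if top is None or i > top:
--             top = i
--         if test and i > maxf:
--             continue
--         j = 0
--         while j < len(pairs) and pairs[j][0] <= i:
--             j += 1
--         pairs.insert(j, (i, v))
--     tmp = ['%d:%d' % p for p in pairs]
--     if not test and top is not None and top > maxf:
--         maxf = top
--     return tmp, maxf
-- ===== Notes on version B (the rewrite author's own statement) =====
-- stated objective: alternative
-- what changed: A sorts the keys with the library sort and then runs one stateful loop that interleaves the running-max update, the test-mode skip and the formatting; B never calls sorted(): it makes a single pass over the dict items maintaining an insertion-sorted list of (key,value) pairs (filtering keys > maxf before insertion in test mode), tracks the largest key in a separate accumulator over the unsorted order, and formats in a final pass.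
import Mathlib
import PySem

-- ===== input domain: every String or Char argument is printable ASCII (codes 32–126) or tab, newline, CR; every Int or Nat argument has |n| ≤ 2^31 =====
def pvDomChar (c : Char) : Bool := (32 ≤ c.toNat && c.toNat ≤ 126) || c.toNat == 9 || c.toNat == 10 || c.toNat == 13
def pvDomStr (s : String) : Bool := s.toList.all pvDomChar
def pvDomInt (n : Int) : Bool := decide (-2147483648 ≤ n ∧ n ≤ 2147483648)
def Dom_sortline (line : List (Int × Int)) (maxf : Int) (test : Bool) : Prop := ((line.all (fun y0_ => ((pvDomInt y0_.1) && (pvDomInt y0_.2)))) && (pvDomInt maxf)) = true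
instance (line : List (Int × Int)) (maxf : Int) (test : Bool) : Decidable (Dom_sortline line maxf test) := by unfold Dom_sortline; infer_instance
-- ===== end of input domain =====

-- B drops A's library sort + single stateful loop: it makes one pass over the dict
-- items maintaining an insertion-sorted pair list (filtering before insertion in test
-- mode), tracks the largest key in a separate accumulator, and formats at the end;
-- objective: alternative (same result by insertion sort instead of sorted()).

-- shared adapter: the Python dict argument (an association list here)
def pvDict (line : List (Int × Int)) : PySem.Dict Int Int := PySem.Dict.ofList line

-- ===== PORT A =====
-- '%d:%d' % (i, line[i])
def pvFmt (d : PySem.Dict Int Int) (i : Int) : String :=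
  PySem.Int.toStr i ++ ":" ++ PySem.Int.toStr (d.getD i 0)

-- A's loop body: update maxf, maybe 'continue', else append the formatted entry
def stepA (f : Int → String) (test : Bool) (s : List String × Int) (i : Int) : List String × Int :=
  let m := if s.2 < i ∧ test = false then i else s.2
  if test = true ∧ m < i then (s.1, m)
  else (s.1 ++ [f i], m)

def sortline (line : List (Int × Int)) (maxf : Int) (test : Bool) : List String × Int :=
  let d := pvDict line
  let ks := PySem.List.sorted d.keys (fun x => x) false
  ks.foldl (stepA (pvFmt d) test) ([], maxf)

-- ===== PORT B =====
-- '%d:%d' % p  for a stored (key, value) pair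
def pvFmtP (p : Int × Int) : String :=
  PySem.Int.toStr p.1 ++ ":" ++ PySem.Int.toStr p.2

-- the while loop: j = 0; while j < len(pairs) and pairs[j][0] <= i: j += 1
def insPos (pairs : List (Int × Int)) (i : Int) : Nat :=
  match pairs with
  | [] => 0
  | p :: t => if p.1 ≤ i then insPos t i + 1 else 0

-- B's loop body: track top, maybe 'continue', else pairs.insert(j, (i, v))
def stepB (maxf : Int) (test : Bool) (s : List (Int × Int) × Option Int) (kv : Int × Int) : List (Int × Int) × Option Int :=
  let top := match s.2 with
    | none => some kv.1
    | some t => if t < kv.1 then some kv.1 else some t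
  if test = true ∧ maxf < kv.1 then (s.1, top)
  else (PySem.List.insert s.1 ((insPos s.1 kv.1 : Nat) : Int) kv, top)

def sortline_alt (line : List (Int × Int)) (maxf : Int) (test : Bool) : List String × Int :=
  let d := pvDict line
  let r := d.items.foldl (stepB maxf test) ([], none)
  let tmp := r.1.map pvFmtP
  (tmp,
   if test = false then
     match r.2 with
     | none => maxf
     | some t => if maxf < t then t else maxf
   else maxf)

-- ===== PRECONDITION & SPEC =====
def Spec_sortline (line : List (Int × Int)) (maxf : Int) (test : Bool) (out : List String × Int) : Prop := out = sortline_alt line maxf test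
instance (line : List (Int × Int)) (maxf : Int) (test : Bool) (out : List String × Int) : Decidable (Spec_sortline line maxf test out) := by unfold Spec_sortline; infer_instance

-- ===== CLAIM =====
def Claim_equal_sortline : Prop := ∀ (line : List (Int × Int)) (maxf : Int) (test : Bool), Dom_sortline line maxf test → Spec_sortline line maxf test (sortline line maxf test)

-- ===== LEMMAS AND PROOFS =====

-- ---- A-side loop characterisation ----

theorem stepA_true_eq (f : Int → String) :
    stepA f true = fun (s : List String × Int) i =>
      if s.2 < i then s else (s.1 ++ [f i], s.2) := by
  funext s i
  simp [stepA]

theorem stepA_false_eq (f : Int → String) :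
    stepA f false = fun (s : List String × Int) i =>
      (s.1 ++ [f i], max s.2 i) := by
  funext s i
  simp only [stepA]
  simp
  omega

theorem foldA_test (f : Int → String) (maxf : Int) (ks : List Int) (acc : List String) :
    ks.foldl (fun (s : List String × Int) i =>
        if s.2 < i then s else (s.1 ++ [f i], s.2)) (acc, maxf)
    = (acc ++ (ks.filter (fun i => decide (i ≤ maxf))).map f, maxf) := by
  induction ks generalizing acc with
  | nil => simp
  | cons x t ih =>
    simp only [List.foldl_cons, List.filter_cons]
    by_cases h : maxf < x
    · have h2 : ¬ x ≤ maxf := by omega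
      simp [h, h2, ih]
    · have h2 : x ≤ maxf := by omega
      simp [h, h2, ih, List.append_assoc]

theorem foldA_nontest (f : Int → String) (maxf : Int) (ks : List Int) (acc : List String) :
    ks.foldl (fun (s : List String × Int) i =>
        (s.1 ++ [f i], max s.2 i)) (acc, maxf)
    = (acc ++ ks.map f, ks.foldl max maxf) := by
  induction ks generalizing acc maxf with
  | nil => simp
  | cons x t ih =>
    simp only [List.foldl_cons, List.map_cons]
    rw [ih]
    simp

theorem foldl_max_pull (t : List Int) (a b : Int) :
    t.foldl max (max a b) = max a (t.foldl max b) := by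
  induction t generalizing b with
  | nil => rfl
  | cons c t ih => simp only [List.foldl_cons, max_assoc, ih]

theorem foldl_max_perm {xs ys : List Int} (h : xs.Perm ys) (m : Int) :
    xs.foldl max m = ys.foldl max m :=
  haveI : RightCommutative (max : Int → Int → Int) :=
    ⟨fun b a a' => max_right_comm b a a'⟩
  h.foldl_eq m

-- ---- B-side loop characterisation ----

-- the while-loop position + list.insert IS insertion before the first larger key
theorem insPos_le (pairs : List (Int × Int)) (i : Int) : insPos pairs i ≤ pairs.length := by
  induction pairs with
  | nil => simp [insPos]
  | cons p t ih =>
    simp only [insPos, List.length_cons]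
    split <;> omega

theorem ins_eq_insertBy (pairs : List (Int × Int)) (kv : Int × Int) :
    PySem.List.insert pairs ((insPos pairs kv.1 : Nat) : Int) kv
      = PySem.List.insertBy (fun a b => decide (a.1 < b.1)) kv pairs := by
  induction pairs with
  | nil => simp [insPos, PySem.List.insert, PySem.List.insertBy]
  | cons p t ih =>
    by_cases h : p.1 ≤ kv.1
    · have hle : insPos t kv.1 ≤ t.length := insPos_le t kv.1
      have hpos : insPos (p :: t) kv.1 = insPos t kv.1 + 1 := by simp [insPos, h]
      have h1 : PySem.List.insert (p :: t) (((insPos t kv.1 + 1 : Nat)) : Int) kv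
          = (p :: t).take (insPos t kv.1 + 1) ++ kv :: (p :: t).drop (insPos t kv.1 + 1) :=
        PySem.List.insert_natCast _ _ _ (by simpa using Nat.succ_le_succ hle)
      have h2 : PySem.List.insert t ((insPos t kv.1 : Nat) : Int) kv
          = t.take (insPos t kv.1) ++ kv :: t.drop (insPos t kv.1) :=
        PySem.List.insert_natCast t _ kv hle
      have hb : ¬ kv.1 < p.1 := by omega
      rw [hpos, h1, List.take_succ_cons, List.drop_succ_cons, List.cons_append, ← h2, ih]
      simp [PySem.List.insertBy, hb]
    · have hb : kv.1 < p.1 := by omega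
      simp [insPos, h, PySem.List.insert_zero, PySem.List.insertBy, hb]

-- B's single loop splits into: insertion-sort fold over the kept items, and a max fold
theorem foldB_split (maxf : Int) (test : Bool) (its : List (Int × Int))
    (acc : List (Int × Int)) (t : Option Int) :
    its.foldl (stepB maxf test) (acc, t)
    = ((its.filter (fun kv => !(test && decide (maxf < kv.1)))).foldl
         (fun a kv => PySem.List.insertBy (fun a b => decide (a.1 < b.1)) kv a) acc,
       its.foldl (fun o (kv : Int × Int) => match o with
         | none => some kv.1
         | some x => if x < kv.1 then some kv.1 else some x) t) := by
  induction its generalizing acc t with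
  | nil => simp
  | cons kv rest ih =>
    simp only [List.foldl_cons, List.filter_cons]
    by_cases hc : test = true ∧ maxf < kv.1
    · have hb : (!(test && decide (maxf < kv.1))) = false := by
        simp [hc.1, hc.2]
      rw [hb]
      simp only [Bool.false_eq_true, if_false]
      have hstep : stepB maxf test (acc, t) kv
          = (acc, match t with
              | none => some kv.1
              | some x => if x < kv.1 then some kv.1 else some x) := by
        simp [stepB, hc]
      rw [hstep]
      exact ih _ _
    · have hb : (!(test && decide (maxf < kv.1))) = true := by
        cases test with
        | false => simp
        | true =>
          have hh : ¬ maxf < kv.1 := fun hlt => hc ⟨rfl, hlt⟩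
          simp [hh]
      rw [hb, if_pos rfl]
      simp only [List.foldl_cons]
      have hstep : stepB maxf test (acc, t) kv
          = (PySem.List.insertBy (fun a b => decide (a.1 < b.1)) kv acc,
             match t with
             | none => some kv.1
             | some x => if x < kv.1 then some kv.1 else some x) := by
        simp only [stepB, if_neg hc]
        rw [ins_eq_insertBy]
      rw [hstep]
      exact ih _ _

theorem topFold_some (its : List (Int × Int)) (m : Int) :
    its.foldl (fun o (kv : Int × Int) => match o with
      | none => some kv.1
      | some x => if x < kv.1 then some kv.1 else some x) (some m)
    = some (its.foldl (fun a kv => max a kv.1) m) := by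
  induction its generalizing m with
  | nil => rfl
  | cons kv rest ih =>
    have h : (if m < kv.1 then some kv.1 else some m) = some (max m kv.1) := by
      split_ifs with h
      · rw [max_eq_right (le_of_lt h)]
      · rw [max_eq_left (not_lt.1 h)]
    rw [List.foldl_cons, List.foldl_cons]
    show List.foldl (fun o (kv : Int × Int) => match o with
        | none => some kv.1
        | some x => if x < kv.1 then some kv.1 else some x)
      (if m < kv.1 then some kv.1 else some m) rest
      = some (List.foldl (fun a (kv : Int × Int) => max a kv.1) (max m kv.1) rest)
    rw [h]
    exact ih _

-- sorted over a key-projected map/filter of strictly increasing keys, named explicitly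
theorem sorted_filter_map_keys (d : PySem.Dict Int Int) (p : Int → Bool)
    (hnd : d.keys.Nodup) :
    PySem.List.sorted ((d.items).filter (fun kv => p kv.1)) Prod.fst false
    = ((PySem.List.sorted d.keys (fun x => x) false).filter p).map
        (fun k => (k, d.getD k 0)) := by
  apply PySem.List.sorted_eq_of_perm_of_pairwise_lt
  · have hperm : (PySem.List.sorted d.keys (fun x => x) false).Perm d.keys :=
      PySem.List.sorted_perm _ _ _
    have h1 : (((PySem.List.sorted d.keys (fun x => x) false).filter p).map
        (fun k => (k, d.getD k 0))).Perm
        ((d.keys.filter p).map (fun k => (k, d.getD k 0))) :=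
      (hperm.filter p).map _
    have h2 : (d.keys.filter p).map (fun k => (k, d.getD k 0))
        = (d.items).filter (fun kv => p kv.1) := by
      rw [PySem.Dict.items_eq_map_keys d hnd 0, List.filter_map]
      rfl
    rw [h2] at h1
    exact h1
  · rw [List.pairwise_map]
    have hs : (PySem.List.sorted d.keys (fun x => x) false).Pairwise (· ≤ ·) := by
      simpa using PySem.List.sorted_pairwise d.keys (fun x => x)
    have hn : (PySem.List.sorted d.keys (fun x => x) false).Pairwise (· ≠ ·) :=
      (hnd.perm (PySem.List.sorted_perm _ _ _).symm)
    have hlt : (PySem.List.sorted d.keys (fun x => x) false).Pairwise (· < ·) :=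
      (hs.and hn).imp (fun h => lt_of_le_of_ne h.1 h.2)
    exact (hlt.filter p).imp (fun h => h)

theorem max_of_ite (x k : Int) : (if x < k then k else x) = max x k := by
  split <;> omega

-- ===== VERDICT =====
theorem sortline_spec : Claim_equal_sortline := by
  intro line maxf test _
  unfold Spec_sortline sortline sortline_alt
  have hnd : (pvDict line).keys.Nodup := PySem.Dict.nodup_keys_ofList line
  cases test with
  | true =>
    simp only [stepA_true_eq, foldA_test, foldB_split, Bool.true_and, List.nil_append]
    rw [← PySem.List.sorted_eq_foldl_insertBy]
    simp only [sorted_filter_map_keys (pvDict line) (fun i => !decide (maxf < i)) hnd]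
    have hpred : (fun i : Int => !decide (maxf < i)) = (fun i => decide (i ≤ maxf)) := by
      funext i
      rcases lt_or_ge maxf i with h | h
      · simp [h, show ¬ i ≤ maxf from by omega]
      · simp [show ¬ maxf < i from by omega, show i ≤ maxf from by omega]
    rw [hpred]
    simp [List.map_map, pvFmtP, pvFmt, Function.comp]
  | false =>
    simp only [stepA_false_eq, foldA_nontest, foldB_split, Bool.false_and, Bool.not_false,
      List.filter_true, List.nil_append]
    rw [← PySem.List.sorted_eq_foldl_insertBy]
    have hfirst : (PySem.List.sorted (pvDict line).items Prod.fst false).map pvFmtP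
        = (PySem.List.sorted (pvDict line).keys (fun x => x) false).map (pvFmt (pvDict line)) := by
      have h := sorted_filter_map_keys (pvDict line) (fun _ => true) hnd
      simp only [List.filter_true] at h
      rw [h, List.map_map]
      rfl
    have hperm : (PySem.List.sorted (pvDict line).keys (fun x => x) false).Perm (pvDict line).keys :=
      PySem.List.sorted_perm _ _ _
    simp only [Prod.mk.injEq]
    cases hitems : (pvDict line).items with
    | nil =>
      have hkeys : (pvDict line).keys = [] := by
        simp [PySem.Dict.keys, hitems]
      constructor
      · rw [← hitems, hfirst]
      · rw [foldl_max_perm hperm, hkeys]; simp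
    | cons kv rest =>
      have hkeys : (pvDict line).keys = kv.1 :: rest.map (·.1) := by
        simp [PySem.Dict.keys, hitems]
      constructor
      · rw [← hitems, hfirst]
      · simp only [List.foldl_cons, topFold_some]
        rw [foldl_max_perm hperm, hkeys]
        have hmap : rest.foldl (fun a kv => max a kv.1) kv.1
            = (rest.map (·.1)).foldl max kv.1 := by
          rw [List.foldl_map]
        simp only [List.foldl_cons]
        rw [foldl_max_pull, hmap, max_of_ite]
        simp
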